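-- pv_equiv track=rewrite | github.com/arknave/project-euler | python/pe348.py | ways
-- ===== SOURCE A (Python) =====
-- import math
--
-- def ways(x):
--     """Count the number of ways to write x = a^3 + b^2, a, b integers > 1."""
--
--     ans = 0
--     a = 2
--     a3 = 8
--     while a3 < x:
--         b2 = x - a3
--         b = math.isqrt(b2)
--         if b * b == b2:
--             ans += 1
--
--         a += 1
--         a3 = a * a * a
--
--     return ans
-- ===== SOURCE B (Python) =====
-- def ways(x):
--     """Count the number of ways to write x = a^3 + b^2, a, b integers > 1."""
--     cubes = set()
--     a = 2
--     while a * a * a < x: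
--         cubes.add(a * a * a)
--         a += 1
--     count = 0
--     b = 1
--     while b * b < x:
--         if x - b * b in cubes:
--             count += 1
--         b += 1
--     return count
-- ===== Notes on version B (the rewrite author's own statement) =====
-- stated objective: alternative
-- what changed: B enumerates the square base b (while b*b < x) and tests x - b*b for membership in a set of cubes built once, instead of A's loop over the cube base a with an integer square root per step.
import Mathlib
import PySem

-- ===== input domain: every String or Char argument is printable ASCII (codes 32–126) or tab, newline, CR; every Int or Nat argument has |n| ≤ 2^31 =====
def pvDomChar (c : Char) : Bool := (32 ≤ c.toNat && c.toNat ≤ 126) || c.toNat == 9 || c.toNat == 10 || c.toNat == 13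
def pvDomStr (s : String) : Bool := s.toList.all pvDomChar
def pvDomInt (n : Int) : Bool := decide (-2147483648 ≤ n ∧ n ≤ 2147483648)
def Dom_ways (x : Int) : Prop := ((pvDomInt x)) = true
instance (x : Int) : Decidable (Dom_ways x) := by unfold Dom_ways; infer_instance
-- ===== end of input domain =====

-- B enumerates the square base b against a precomputed set of cubes instead of A's cube base with isqrt:
-- a different traversal of the same count (objective: alternative, not faster).

-- termination helper for the cube-base loops (cited by decreasing_by)
theorem pvCubeStep (a : Int) : a*a*a < (a+1)*(a+1)*(a+1) := by nlinarith [sq_nonneg (2*a+1)]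
-- termination helper for the square-base loop (cited by decreasing_by)
theorem pvSqLtImp (b x : Int) (h : b*b < x) : b < x := by
  rcases le_total 0 b with h0|h0 <;> nlinarith

-- ===== PORT A =====
-- A's while loop; a3 is recomputed as a*a*a (A caches it in a variable holding the same value).
-- math.isqrt(b2) on b2 ≥ 0 (always the case here, since a3 < x) is exactly Int.sqrt.
def waysLoopA (x a ans : Int) : Int :=
  if _h : a*a*a < x then
    let b2 := x - a*a*a
    let b := Int.sqrt b2
    waysLoopA x (a+1) (if b * b = b2 then ans + 1 else ans)
  else ans
termination_by (x - a*a*a).toNat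
decreasing_by
  have := pvCubeStep a; omega

def ways (x : Int) : Int := waysLoopA x 2 0

-- ===== PORT B =====
-- first loop of Source B: build the set of cubes a^3 (a ≥ 2) below x
def cubesLoopB (x a : Int) (s : PySem.Set Int) : PySem.Set Int :=
  if _h : a*a*a < x then cubesLoopB x (a+1) (PySem.Set.add s (a*a*a)) else s
termination_by (x - a*a*a).toNat
decreasing_by
  have := pvCubeStep a; omega

-- second loop of Source B: scan b while b*b < x, counting hits of x - b*b in the cube set
def countLoopB (x b : Int) (s : PySem.Set Int) (count : Int) : Int :=
  if _h : b*b < x then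
    countLoopB x (b+1) s (if (x - b*b) ∈ s then count + 1 else count)
  else count
termination_by (x - b).toNat
decreasing_by
  have := pvSqLtImp b x _h; omega

def ways_alt (x : Int) : Int := countLoopB x 1 (cubesLoopB x 2 PySem.Set.empty) 0

-- ===== PRECONDITION & SPEC =====
def Spec_ways (x : Int) (out : Int) : Prop := out = ways_alt x
instance (x : Int) (out : Int) : Decidable (Spec_ways x out) := by unfold Spec_ways; infer_instance

-- ===== CLAIM (what is proved, stated in full; the proofs are below) =====
def Claim_equal_ways : Prop := ∀ (x : Int), Dom_ways x → Spec_ways x (ways x)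

-- ===== LEMMAS AND PROOFS =====

theorem cube_mono {a b : Int} (h : a ≤ b) : a*a*a ≤ b*b*b := by
  nlinarith [sq_nonneg (a+b), sq_nonneg (a-b), sq_nonneg a, sq_nonneg b]

theorem cube_inj {a b : Int} (h : a*a*a = b*b*b) : a = b := by
  nlinarith [sq_nonneg (a+b), sq_nonneg (a-b), sq_nonneg a, sq_nonneg b]

-- Under x ≤ 2^31: a*a*a < x forces a ≤ 1290, b*b < x forces b ≤ 46340.
theorem cube_bound {x a : Int} (hx : x ≤ 2147483648) (h : a*a*a < x) : a ≤ 1290 := by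
  by_contra hc
  have h1 : (1291:Int) ≤ a := by omega
  have : (1291:Int)*1291*1291 ≤ a*a*a := cube_mono h1
  omega

theorem sq_bound {x b : Int} (hx : x ≤ 2147483648) (h : b*b < x) : b ≤ 46340 := by
  by_contra hc
  have h1 : (46341:Int) ≤ b := by omega
  have : (46341:Int)*46341 ≤ b*b := by nlinarith
  omega

theorem Icc_int_insert {a n : Int} (h : a ≤ n) :
    Finset.Icc a n = insert a (Finset.Icc (a+1) n) := by
  ext y; simp only [Finset.mem_Icc, Finset.mem_insert]; omega

-- A's loop counts exactly the a' ∈ [a, 1290] with a'^3 < x and x - a'^3 a perfect square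
theorem waysLoopA_eq (x : Int) (hx : x ≤ 2147483648) :
    ∀ a ans : Int, waysLoopA x a ans = ans +
      ((Finset.Icc a 1290).filter
        (fun a' => a'*a'*a' < x ∧
          Int.sqrt (x - a'*a'*a') * Int.sqrt (x - a'*a'*a') = x - a'*a'*a')).card := by
  intro a ans
  induction a, ans using waysLoopA.induct x with
  | case1 a ans h b2 b ih =>
    rw [waysLoopA, dif_pos h]
    simp only [dite_eq_ite] at ih ⊢
    rw [ih]
    have hb : a ≤ 1290 := cube_bound hx h
    rw [Icc_int_insert hb, Finset.filter_insert]
    by_cases hs : Int.sqrt (x - a*a*a) * Int.sqrt (x - a*a*a) = x - a*a*a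
    · rw [if_pos hs, if_pos ⟨h, hs⟩, Finset.card_insert_of_notMem (by simp)]
      push_cast; ring
    · rw [if_neg hs, if_neg (by exact fun hc => hs hc.2)]
  | case2 a ans h =>
    rw [waysLoopA, dif_neg h]
    have he : (Finset.Icc a 1290).filter
        (fun a' => a'*a'*a' < x ∧
          Int.sqrt (x - a'*a'*a') * Int.sqrt (x - a'*a'*a') = x - a'*a'*a') = ∅ := by
      apply Finset.filter_eq_empty_iff.mpr
      intro a' ha' hc
      have ha2 : a ≤ a' := (Finset.mem_Icc.mp ha').1
      have := cube_mono ha2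
      exact h (by omega)
    rw [he, Finset.card_empty]; simp

-- membership in the cube set built by B's first loop
theorem mem_cubesLoopB (x : Int) :
    ∀ (a : Int) (s : PySem.Set Int) (r : Int),
      r ∈ cubesLoopB x a s ↔ r ∈ s ∨ ∃ a', a ≤ a' ∧ a'*a'*a' < x ∧ a'*a'*a' = r := by
  intro a s r
  induction a, s using cubesLoopB.induct x with
  | case1 a s h ih =>
    rw [cubesLoopB, dif_pos h, ih, PySem.Set.mem_add]
    constructor
    · rintro ((hs | he) | ⟨a', ha1, ha2, ha3⟩)
      · exact Or.inl hs
      · exact Or.inr ⟨a, le_refl a, h, he.symm⟩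
      · exact Or.inr ⟨a', by omega, ha2, ha3⟩
    · rintro (hs | ⟨a', ha1, ha2, ha3⟩)
      · exact Or.inl (Or.inl hs)
      · rcases eq_or_lt_of_le ha1 with heq | hl
        · exact Or.inl (Or.inr (by rw [← heq] at ha3; omega))
        · exact Or.inr ⟨a', by omega, ha2, ha3⟩
  | case2 a s h =>
    rw [cubesLoopB, dif_neg h]
    constructor
    · exact Or.inl
    · rintro (hs | ⟨a', ha1, ha2, _⟩)
      · exact hs
      · exact absurd ha2 (by have := cube_mono ha1; omega)

-- B's counting loop counts exactly the b' ∈ [b, 46340] with b'^2 < x and x - b'^2 in s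
theorem countLoopB_eq (x : Int) (hx : x ≤ 2147483648) (s : PySem.Set Int) :
    ∀ b count : Int, 1 ≤ b → countLoopB x b s count = count +
      ((Finset.Icc b 46340).filter (fun b' => b'*b' < x ∧ (x - b'*b') ∈ s)).card := by
  intro b count
  induction b, count using countLoopB.induct x s with
  | case1 b count h ih =>
    intro hb1
    rw [countLoopB, dif_pos h]
    simp only [dite_eq_ite] at ih ⊢
    rw [ih (by omega)]
    have hbb : b ≤ 46340 := sq_bound hx h
    rw [Icc_int_insert hbb, Finset.filter_insert]
    by_cases hm : (x - b*b) ∈ s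
    · rw [if_pos hm, if_pos ⟨h, hm⟩, Finset.card_insert_of_notMem (by simp)]
      push_cast; ring
    · rw [if_neg hm, if_neg (by exact fun hc => hm hc.2)]
  | case2 b count h =>
    intro hb1
    rw [countLoopB, dif_neg h]
    have he : (Finset.Icc b 46340).filter (fun b' => b'*b' < x ∧ (x - b'*b') ∈ s) = ∅ := by
      apply Finset.filter_eq_empty_iff.mpr
      intro b' hb' hc
      have hb2 : b ≤ b' := (Finset.mem_Icc.mp hb').1
      have : b*b ≤ b'*b' := by nlinarith
      exact absurd hc.1 (by omega)
    rw [he, Finset.card_empty]; simp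

theorem sqrt_self_mul {b : Int} (h : 0 ≤ b) : Int.sqrt (b*b) = b := by
  rw [Int.sqrt_eq]; exact Int.natAbs_of_nonneg h

-- the heart of the equivalence: the two filtered index sets are in bijection via a ↦ isqrt(x - a^3)
theorem card_condA_eq_condB (x : Int) (hx : x ≤ 2147483648) :
    ((Finset.Icc (2:Int) 1290).filter
        (fun a' => a'*a'*a' < x ∧
          Int.sqrt (x - a'*a'*a') * Int.sqrt (x - a'*a'*a') = x - a'*a'*a')).card =
      ((Finset.Icc (1:Int) 46340).filter
        (fun b => b*b < x ∧ ∃ a ∈ Finset.Icc (2:Int) 1290, a*a*a < x ∧ a*a*a = x - b*b)).card := by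
  apply Finset.card_bij (fun a _ => Int.sqrt (x - a*a*a))
  · intro a ha
    simp only [Finset.mem_filter, Finset.mem_Icc] at ha ⊢
    obtain ⟨⟨ha2, ha9⟩, hlt, hsq⟩ := ha
    have hb0 : 0 ≤ Int.sqrt (x - a*a*a) := Int.sqrt_nonneg _
    have h8 : (8:Int) ≤ a*a*a := by have := cube_mono ha2; omega
    have hbx : Int.sqrt (x - a*a*a) * Int.sqrt (x - a*a*a) < x := by omega
    have hb1 : 1 ≤ Int.sqrt (x - a*a*a) := by
      rcases eq_or_lt_of_le hb0 with heq | hl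
      · exfalso; rw [← heq] at hsq; omega
      · omega
    exact ⟨⟨hb1, sq_bound hx hbx⟩, hbx, a, ⟨ha2, ha9⟩, hlt, by omega⟩
  · intro a1 h1 a2 h2 heq
    simp only [Finset.mem_filter, Finset.mem_Icc] at h1 h2
    obtain ⟨_, _, hs1⟩ := h1; obtain ⟨_, _, hs2⟩ := h2
    rw [heq] at hs1
    exact cube_inj (by omega)
  · intro b hbm
    simp only [Finset.mem_filter, Finset.mem_Icc] at hbm
    obtain ⟨⟨hb1, _⟩, _, a, ⟨ha2, ha9⟩, halt, haeq⟩ := hbm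
    have hsq : Int.sqrt (x - a*a*a) = b := by
      rw [show x - a*a*a = b*b by omega]; exact sqrt_self_mul (by omega)
    refine ⟨a, ?_, hsq⟩
    simp only [Finset.mem_filter, Finset.mem_Icc]
    exact ⟨⟨ha2, ha9⟩, halt, by rw [hsq]; omega⟩

-- ===== VERDICT (by name: the statement is the Claim_ definition above) =====
theorem ways_spec : Claim_equal_ways := by
  intro x hdom
  have hx : x ≤ 2147483648 := by
    unfold Dom_ways pvDomInt at hdom; simp at hdom; exact hdom.2
  unfold Spec_ways ways ways_alt
  rw [waysLoopA_eq x hx 2 0,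
      countLoopB_eq x hx (cubesLoopB x 2 PySem.Set.empty) 1 0 (le_refl 1)]
  have hfe : (Finset.Icc (1:Int) 46340).filter
        (fun b' => b'*b' < x ∧ (x - b'*b') ∈ cubesLoopB x 2 PySem.Set.empty) =
      (Finset.Icc (1:Int) 46340).filter
        (fun b => b*b < x ∧ ∃ a ∈ Finset.Icc (2:Int) 1290, a*a*a < x ∧ a*a*a = x - b*b) := by
    apply Finset.filter_congr
    intro b _
    have hm := mem_cubesLoopB x 2 PySem.Set.empty (x - b*b)
    simp only [PySem.Set.empty, List.not_mem_nil, false_or] at hm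
    constructor
    · rintro ⟨hb, hmem⟩
      obtain ⟨a, ha2, halt, haeq⟩ := hm.mp hmem
      exact ⟨hb, a, Finset.mem_Icc.mpr ⟨ha2, cube_bound hx halt⟩, halt, by omega⟩
    · rintro ⟨hb, a, ham, halt, haeq⟩
      exact ⟨hb, hm.mpr ⟨a, (Finset.mem_Icc.mp ham).1, halt, by omega⟩⟩
  rw [hfe, card_condA_eq_condB x hx]
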